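-- pv_equiv track=rewrite | github.com/ATHIEPPPP/LearnCheckAI | backend/main.py | _norm_choice
-- ===== SOURCE A (Python) =====
-- from typing import List, Dict, Optional
--
-- CHOICES = {"A", "B", "C", "D", "E"}
--
-- def _norm_choice(x: Optional[str]) -> str:
--     if x is None:
--         return ""
--     s = str(x).strip().upper()
--     for ch in s:
--         if ch in CHOICES:
--             return ch
--     for ch in s:
--         if ch in "12345":
--             return "ABCDE"[int(ch) - 1]
--     return ""
-- ===== SOURCE B (Python) =====
-- from typing import Optional
--
-- CHOICES = {"A", "B", "C", "D", "E"}
--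
-- def _norm_choice(x: Optional[str]) -> str:
--     # Single pass: return on the first letter A-E; remember the first digit 1-5.
--     if x is None:
--         return ""
--     d = None
--     for ch in str(x).strip().upper():
--         if ch in CHOICES:
--             return ch
--         if d is None and ch in "12345":
--             d = ch
--     return "ABCDE"[int(d) - 1] if d is not None else ""
-- ===== Notes on version B (the rewrite author's own statement) =====
-- stated objective: simpler
-- what changed: Replaces A's two sequential scans (letters, then digits) with a single pass that returns on the first letter and merely records the first digit, mapping it after the loop.
import Mathlib
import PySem

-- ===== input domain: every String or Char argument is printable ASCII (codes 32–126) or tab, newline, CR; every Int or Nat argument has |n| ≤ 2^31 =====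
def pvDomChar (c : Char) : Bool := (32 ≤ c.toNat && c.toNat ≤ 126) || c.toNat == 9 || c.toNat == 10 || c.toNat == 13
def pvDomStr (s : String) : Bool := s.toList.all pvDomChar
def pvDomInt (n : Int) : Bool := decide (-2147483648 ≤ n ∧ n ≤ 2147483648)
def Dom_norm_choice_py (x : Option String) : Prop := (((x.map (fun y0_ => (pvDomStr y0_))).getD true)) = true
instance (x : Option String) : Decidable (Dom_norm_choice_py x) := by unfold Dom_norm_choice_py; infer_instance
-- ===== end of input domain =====

-- B replaces A's two sequential scans with one pass (return on first letter, record first digit); objective: simpler.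

-- ch in CHOICES
def pvIsChoice (c : Char) : Bool := c == 'A' || c == 'B' || c == 'C' || c == 'D' || c == 'E'
-- ch in "12345"
def pvIsDig15 (c : Char) : Bool := c == '1' || c == '2' || c == '3' || c == '4' || c == '5'
-- "ABCDE"[int(ch) - 1] for ch in "12345": int(ch) = c.toNat - 48 (exact on these five chars)
def pvMapDigit (c : Char) : String := String.singleton (['A','B','C','D','E'].getD (c.toNat - 49) 'A')

-- ===== PORT A =====
-- first loop of A: return the first choice letter
def pvScanLetterA : List Char → Option Char
  | [] => none
  | c :: t => if pvIsChoice c then some c else pvScanLetterA t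

-- second loop of A: return the mapped first digit, else ""
def pvScanDigitA : List Char → String
  | [] => ""
  | c :: t => if pvIsDig15 c then pvMapDigit c else pvScanDigitA t

def norm_choice_py (x : Option String) : String :=
  match x with
  | none => ""
  | some s =>
    let l := PySem.Chars.upper (PySem.Chars.strip s.toList)
    match pvScanLetterA l with
    | some c => String.singleton c
    | none => pvScanDigitA l

-- ===== PORT B =====
-- B's single loop with the remembered-digit accumulator d
def pvLoopB : List Char → Option Char → String
  | [], d => match d with
             | some c => pvMapDigit c
             | none => ""
  | c :: t, d =>
    if pvIsChoice c then String.singleton c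
    else if d == none && pvIsDig15 c then pvLoopB t (some c)
    else pvLoopB t d

def norm_choice_py_alt (x : Option String) : String :=
  match x with
  | none => ""
  | some s => pvLoopB (PySem.Chars.upper (PySem.Chars.strip s.toList)) none

-- ===== PRECONDITION & SPEC =====
def Spec_norm_choice_py (x : Option String) (out : String) : Prop := out = norm_choice_py_alt x
instance (x : Option String) (out : String) : Decidable (Spec_norm_choice_py x out) := by unfold Spec_norm_choice_py; infer_instance

-- ===== CLAIM (what is proved, stated in full; the proofs are below) =====
def Claim_equal_norm_choice_py : Prop := ∀ (x : Option String), Dom_norm_choice_py x → Spec_norm_choice_py x (norm_choice_py x)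

-- ===== LEMMAS AND PROOFS =====
-- Invariant of B's loop: it equals A's letter scan, falling back to the recorded digit
-- (if any) and otherwise to A's digit scan.
theorem pvLoopB_eq (l : List Char) (d : Option Char) :
    pvLoopB l d = match pvScanLetterA l with
      | some c => String.singleton c
      | none => match d with
                | some c => pvMapDigit c
                | none => pvScanDigitA l := by
  induction l generalizing d with
  | nil => cases d <;> simp [pvLoopB, pvScanLetterA, pvScanDigitA]
  | cons c t ih =>
    by_cases h1 : pvIsChoice c = true
    · simp [pvLoopB, pvScanLetterA, h1]
    · cases d with
      | none =>
        by_cases h2 : pvIsDig15 c = true <;>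
          simp [pvLoopB, pvScanLetterA, pvScanDigitA, h1, h2, ih]
      | some c' =>
        simp [pvLoopB, pvScanLetterA, h1, ih]

-- ===== VERDICT (by name: the statement is the Claim_ definition above) =====
theorem norm_choice_py_spec : Claim_equal_norm_choice_py := by
  intro x _
  unfold Spec_norm_choice_py norm_choice_py norm_choice_py_alt
  cases x with
  | none => rfl
  | some s =>
    simp only [pvLoopB_eq]
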